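-- pv_equiv track=rewrite | github.com/TehFlux/ifcg | geoutils/python/coords.py | coordsToSeq
-- ===== SOURCE A (Python) =====
-- def coordsToSeq(coords, dimensions):
--     """Transform coordinates to sequence number."""
--     result = 0
--     f = 1
--     for i in range(0, len(coords)):
--         d = dimensions[i]
--         c = coords[i]
--         result += f * c
--         f *= d
--     return result
-- ===== SOURCE B (Python) =====
-- def coordsToSeq(coords, dimensions):
--     """Transform coordinates to sequence number (Horner's method from the most
--     significant digit down, instead of an expanded running-multiplier sum)."""
--     result = 0
--     for i in range(len(coords) - 1, -1, -1):
--         result = result * dimensions[i] + coords[i]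
--     return result
-- ===== Notes on version B (the rewrite author's own statement) =====
-- stated objective: alternative
-- what changed: B evaluates the mixed-radix value by Horner's method in a single backward pass (result = result*dimensions[i] + coords[i]), instead of A's forward pass that maintains an expanded running multiplier f; B also skips A's unused final multiplier update.
import Mathlib
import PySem

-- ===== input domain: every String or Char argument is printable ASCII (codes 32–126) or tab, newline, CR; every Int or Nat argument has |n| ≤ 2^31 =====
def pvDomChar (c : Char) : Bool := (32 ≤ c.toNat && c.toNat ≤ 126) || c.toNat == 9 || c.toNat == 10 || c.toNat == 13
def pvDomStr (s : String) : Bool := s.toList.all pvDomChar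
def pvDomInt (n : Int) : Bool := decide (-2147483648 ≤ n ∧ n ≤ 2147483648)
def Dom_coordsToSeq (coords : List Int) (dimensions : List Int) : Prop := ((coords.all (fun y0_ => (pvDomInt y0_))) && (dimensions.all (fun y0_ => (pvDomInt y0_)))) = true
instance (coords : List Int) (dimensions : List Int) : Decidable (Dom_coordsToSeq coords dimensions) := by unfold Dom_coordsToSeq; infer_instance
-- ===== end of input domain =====

-- B computes the same mixed-radix sequence number by Horner's method in one backward pass
-- (no running multiplier); equivalence of return values is proved on all inputs where A
-- does not raise (Pre_: dimensions at least as long as coords).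

-- ===== PORT A =====
-- forward loop: for i in range(0, len(coords)): result += f*coords[i]; f *= dimensions[i]
def coordsToSeq (coords : List Int) (dimensions : List Int) : Int :=
  (((PySem.List.pyRange 0 (coords.length : Int) 1).foldl
      (fun (s : Int × Int) i =>
        let d := PySem.List.pyGetD dimensions i 0
        let c := PySem.List.pyGetD coords i 0
        (s.1 + s.2 * c, s.2 * d)) (0, 1))).1

-- ===== PORT B =====
-- backward Horner loop: for i in range(len(coords)-1, -1, -1): result = result*dimensions[i] + coords[i]
def coordsToSeq_alt (coords : List Int) (dimensions : List Int) : Int :=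
  (PySem.List.pyRange ((coords.length : Int) - 1) (-1) (-1)).foldl
    (fun r i => r * PySem.List.pyGetD dimensions i 0 + PySem.List.pyGetD coords i 0) 0

-- ===== PRECONDITION & SPEC =====
-- Pre_ excludes exactly the inputs where both Pythons raise IndexError: dimensions shorter than coords.
def Pre_coordsToSeq (coords : List Int) (dimensions : List Int) : Prop :=
  coords.length ≤ dimensions.length
instance (coords : List Int) (dimensions : List Int) : Decidable (Pre_coordsToSeq coords dimensions) := by unfold Pre_coordsToSeq; infer_instance

def pvWitness_coordsToSeq : List Int × List Int := ([2, 1, 3], [4, 5, 6])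

def Spec_coordsToSeq (coords : List Int) (dimensions : List Int) (out : Int) : Prop := out = coordsToSeq_alt coords dimensions
instance (coords : List Int) (dimensions : List Int) (out : Int) : Decidable (Spec_coordsToSeq coords dimensions out) := by unfold Spec_coordsToSeq; infer_instance

-- ===== CLAIM (what is proved, stated in full; the proofs are below) =====
def Claim_equal_coordsToSeq : Prop := ∀ (coords : List Int) (dimensions : List Int), Dom_coordsToSeq coords dimensions → Pre_coordsToSeq coords dimensions → Spec_coordsToSeq coords dimensions (coordsToSeq coords dimensions)

-- ===== LEMMAS AND PROOFS =====

-- the common mixed-radix value, recursively on the digit lists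
def pvHorner : List Int → List Int → Int
  | [], _ => 0
  | _ :: _, [] => 0
  | c :: cs, d :: ds => pvHorner cs ds * d + c

lemma pvHorner_drop (cs ds : List Int) (j : Nat) (hj : j < cs.length)
    (hlen : cs.length ≤ ds.length) :
    pvHorner (cs.drop j) (ds.drop j)
      = pvHorner (cs.drop (j + 1)) (ds.drop (j + 1)) * ds[j]'(by omega) + cs[j]'hj := by
  rw [List.drop_eq_getElem_cons hj, List.drop_eq_getElem_cons (show j < ds.length by omega)]
  rfl

lemma A_loop (cs ds : List Int) (hlen : cs.length ≤ ds.length) :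
    ∀ (j : Nat), j ≤ cs.length → ∀ (r f : Int),
    ((PySem.List.pyRange (j : Int) (cs.length : Int) 1).foldl
      (fun (s : Int × Int) i =>
        (s.1 + s.2 * PySem.List.pyGetD cs i 0, s.2 * PySem.List.pyGetD ds i 0)) (r, f)).1
      = r + f * pvHorner (cs.drop j) (ds.drop j) := by
  intro j
  induction hk : cs.length - j generalizing j with
  | zero =>
    intro hj r f
    have hje : j = cs.length := by omega
    subst hje
    rw [PySem.List.pyRange_one_eq_nil (le_refl _)]
    simp [List.drop_eq_nil_of_le (le_refl cs.length), pvHorner]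
  | succ k ih =>
    intro hj r f
    have hjlt : j < cs.length := by omega
    rw [PySem.List.pyRange_one_cons (by exact_mod_cast hjlt)]
    have hcast : ((j : Int) + 1) = ((j + 1 : Nat) : Int) := by push_cast; ring
    rw [List.foldl_cons, hcast]
    have hstep := ih (j + 1) (by omega) (by omega)
    simp only [PySem.List.pyGetD_natCast, List.getD_eq_getElem?_getD,
      List.getElem?_eq_getElem hjlt, List.getElem?_eq_getElem (show j < ds.length by omega),
      Option.getD_some] at hstep ⊢
    rw [hstep, pvHorner_drop cs ds j hjlt hlen]
    ring

lemma B_foldr (cs ds : List Int) (hlen : cs.length ≤ ds.length) :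
    ∀ (j : Nat), j ≤ cs.length →
    (PySem.List.pyRange (j : Int) (cs.length : Int) 1).foldr
      (fun i r => r * PySem.List.pyGetD ds i 0 + PySem.List.pyGetD cs i 0) 0
      = pvHorner (cs.drop j) (ds.drop j) := by
  intro j
  induction hk : cs.length - j generalizing j with
  | zero =>
    intro hj
    have hje : j = cs.length := by omega
    subst hje
    rw [PySem.List.pyRange_one_eq_nil (le_refl _)]
    simp [List.drop_eq_nil_of_le (le_refl cs.length), pvHorner]
  | succ k ih =>
    intro hj
    have hjlt : j < cs.length := by omega
    rw [PySem.List.pyRange_one_cons (by exact_mod_cast hjlt)]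
    have hcast : ((j : Int) + 1) = ((j + 1 : Nat) : Int) := by push_cast; ring
    rw [List.foldr_cons, hcast, ih (j + 1) (by omega) (by omega),
      pvHorner_drop cs ds j hjlt hlen]
    simp [PySem.List.pyGetD_natCast, List.getD_eq_getElem?_getD,
      List.getElem?_eq_getElem hjlt, List.getElem?_eq_getElem (show j < ds.length by omega)]

lemma alt_eq_horner (cs ds : List Int) (hlen : cs.length ≤ ds.length) :
    coordsToSeq_alt cs ds = pvHorner cs ds := by
  unfold coordsToSeq_alt
  rw [PySem.List.pyRange_neg_one_eq_reverse]
  have h0 : (-1 : Int) + 1 = ((0 : Nat) : Int) := by norm_num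
  have h1 : (cs.length : Int) - 1 + 1 = (cs.length : Int) := by ring
  rw [h0, h1, List.foldl_reverse]
  have := B_foldr cs ds hlen 0 (Nat.zero_le _)
  simpa using this

-- ===== VERDICT (by name: the statement is the Claim_ definition above) =====
theorem coordsToSeq_spec : Claim_equal_coordsToSeq := by
  intro cs ds _ hpre
  unfold Spec_coordsToSeq coordsToSeq
  rw [alt_eq_horner cs ds hpre]
  have := A_loop cs ds hpre 0 (Nat.zero_le _) 0 1
  simpa using this
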